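-- pv_equiv track=rewrite | github.com/hwangchahae/python-codingtest | 프로그래머스/프로그래머스Lv1.택배상자꺼내기.py | solution
-- ===== SOURCE A (Python) =====
-- def solution(end, w, num):
--
--     box_idx = w          # 박스 인덱스 잡기
--     if num % w == 0 :
--         if ( num // w ) % 2 :
--             box_idx = w-1
--         else :
--             box_idx = 0
--     elif (num // w) % 2 :
--         box_idx = -(num % w)
--     else :
--         box_idx = (num % w)-1
--
--
--     -(num % w) if (num//w) % 2 else (num % w)-1
--     box_list= [ 0 for _ in range(w) ]  # 모든 요소가 0 인 길이 w 리스트 생성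
--
--     for i in range(num, end+1) :
--         if i % w == 0 :                # i가 w의 배수면서
--             if (i // w) % 2:           # 몫이 홀수이면
--                 box_list[w-1] += 1     # 제일 오른쪽 끝 요소 카운팅
--             else :                     # 몫이 짝수이면
--                 box_list[0] += 1       # 왼쪽 끝 카운팅
--
--         elif (i // w) % 2 :            # w의 배수가 아니면서
--             box_list[-(i % w)] += 1    # 몫이 홀수인 수는 리스트[-나머지]에 카운팅
--
--         else :                         # w의 배수가 아니면서
--             box_list[(i % w)-1] += 1   # 몫이 짝수인 수는 리스트[나머지-1]에 카운팅
--
--     return box_list[box_idx]           # 상자인덱스에 카운팅 된 수를 반환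
-- ===== SOURCE B (Python) =====
-- def solution(end, w, num):
--     # Boxes follow a boustrophedon layout with period 2w; count the i in
--     # [num, end] whose rack position equals num's, by closed-form arithmetic.
--     if end < num:
--         return 0
--     m = 2 * w
--     r = (num - 1) % m
--     p = r if r < w else m - 1 - r          # 0-based rack position of num
--     def cnt(a):                            # how many i in [num, end] with i % m == a
--         return (end - a) // m - (num - 1 - a) // m
--     return cnt((p + 1) % m) + cnt((m - p) % m)
-- ===== Notes on version B (the rewrite author's own statement) =====
-- stated objective: faster
-- what changed: B replaces A's box-by-box simulation of the whole range(num, end+1) into a length-w rack list by an O(1) closed-form count: rack positions are boustrophedon with period 2w, so B counts the integers in [num, end] congruent to the target's two residues mod 2w with floor-division arithmetic.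
import Mathlib
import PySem

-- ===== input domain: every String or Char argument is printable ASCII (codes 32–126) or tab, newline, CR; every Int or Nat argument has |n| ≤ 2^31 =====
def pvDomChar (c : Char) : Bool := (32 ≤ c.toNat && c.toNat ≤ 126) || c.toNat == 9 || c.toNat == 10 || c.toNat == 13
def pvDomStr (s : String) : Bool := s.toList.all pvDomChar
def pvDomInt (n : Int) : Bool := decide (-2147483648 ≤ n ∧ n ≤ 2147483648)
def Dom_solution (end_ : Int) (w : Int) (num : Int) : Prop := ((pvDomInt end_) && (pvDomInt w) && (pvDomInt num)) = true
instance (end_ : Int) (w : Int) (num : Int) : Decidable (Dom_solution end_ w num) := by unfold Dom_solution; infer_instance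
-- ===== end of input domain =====

-- B replaces A's box-by-box simulation over range(num, end+1) by a closed-form
-- count of the indices congruent to the target's two residues mod 2*w (O(1) vs O(end-num+w)).

-- ===== PORT A =====
-- loop body of A's for-loop (helper so the proofs can name it)
def stepA (w : Int) (bl : List Int) (i : Int) : List Int :=
  if PySem.Int.mod i w = 0 then
    if PySem.Int.mod (PySem.Int.floordiv i w) 2 ≠ 0 then
      PySem.List.pySetD bl (w - 1) (PySem.List.pyGetD bl (w - 1) 0 + 1)
    else
      PySem.List.pySetD bl 0 (PySem.List.pyGetD bl 0 0 + 1)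
  else if PySem.Int.mod (PySem.Int.floordiv i w) 2 ≠ 0 then
    PySem.List.pySetD bl (-(PySem.Int.mod i w)) (PySem.List.pyGetD bl (-(PySem.Int.mod i w)) 0 + 1)
  else
    PySem.List.pySetD bl (PySem.Int.mod i w - 1) (PySem.List.pyGetD bl (PySem.Int.mod i w - 1) 0 + 1)

def solution (end_ : Int) (w : Int) (num : Int) : Int :=
  let box_idx : Int :=
    if PySem.Int.mod num w = 0 then
      if PySem.Int.mod (PySem.Int.floordiv num w) 2 ≠ 0 then w - 1 else 0
    else if PySem.Int.mod (PySem.Int.floordiv num w) 2 ≠ 0 then -(PySem.Int.mod num w)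
    else PySem.Int.mod num w - 1
  let box_list : List Int := (PySem.List.pyRange 0 w 1).map (fun _ => 0)
  let final := (PySem.List.pyRange num (end_ + 1) 1).foldl (stepA w) box_list
  PySem.List.pyGetD final box_idx 0

-- ===== PORT B =====
def solution_alt (end_ : Int) (w : Int) (num : Int) : Int :=
  if end_ < num then 0
  else
    let m := 2 * w
    let r := PySem.Int.mod (num - 1) m
    let p := if r < w then r else m - 1 - r
    let cnt : Int → Int := fun a =>
      PySem.Int.floordiv (end_ - a) m - PySem.Int.floordiv (num - 1 - a) m
    cnt (PySem.Int.mod (p + 1) m) + cnt (PySem.Int.mod (m - p) m)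

-- ===== PRECONDITION & SPEC =====
-- Pre_ excludes w ≤ 0, where A always raises (ZeroDivisionError for w = 0,
-- IndexError for w < 0: the rack list is empty).
def Pre_solution (end_ : Int) (w : Int) (num : Int) : Prop := 1 ≤ w
instance (end_ : Int) (w : Int) (num : Int) : Decidable (Pre_solution end_ w num) := by unfold Pre_solution; infer_instance
def pvWitness_solution : Int × Int × Int := (10, 3, 2)
def Spec_solution (end_ : Int) (w : Int) (num : Int) (out : Int) : Prop := out = solution_alt end_ w num
instance (end_ : Int) (w : Int) (num : Int) (out : Int) : Decidable (Spec_solution end_ w num out) := by unfold Spec_solution; infer_instance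

-- ===== CLAIM (what is proved, stated in full; the proofs are below) =====
def Claim_equal_solution : Prop := ∀ (end_ : Int) (w : Int) (num : Int), Dom_solution end_ w num → Pre_solution end_ w num → Spec_solution end_ w num (solution end_ w num)

-- ===== LEMMAS AND PROOFS =====

-- A's raw (possibly negative) rack index for box i, in ediv/emod form
def rawIdx (w i : Int) : Int :=
  if i % w = 0 then
    if (i / w) % 2 ≠ 0 then w - 1 else 0
  else if (i / w) % 2 ≠ 0 then -(i % w)
  else i % w - 1

-- canonical (nonnegative) rack position of box i: boustrophedon with period 2w
def posP (w i : Int) : Int :=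
  if (i - 1) % (2 * w) < w then (i - 1) % (2 * w) else 2 * w - 1 - (i - 1) % (2 * w)

lemma emod_eq_of_dvd_sub {n r x : Int} (hn : 0 < n) (hr : 0 ≤ r) (hr2 : r < n)
    (hd : n ∣ (x - r)) : x % n = r := by
  have h1 : x % n = r % n :=
    Int.emod_eq_emod_iff_emod_sub_eq_zero.mpr (Int.dvd_iff_emod_eq_zero.mp hd)
  rw [h1, Int.emod_eq_of_lt hr hr2]

lemma posP_bounds {w : Int} (hw : 0 < w) (i : Int) : 0 ≤ posP w i ∧ posP w i < w := by
  have h0 := Int.emod_nonneg (i - 1) (show (2*w) ≠ 0 by omega)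
  have h1 := Int.emod_lt_of_pos (i - 1) (show (0:Int) < 2*w by omega)
  unfold posP; split_ifs <;> omega

lemma stepA_raw {w : Int} (hw : 0 < w) (bl : List Int) (i : Int) :
    stepA w bl i = PySem.List.pySetD bl (rawIdx w i) (PySem.List.pyGetD bl (rawIdx w i) 0 + 1) := by
  simp only [stepA, rawIdx, PySem.Int.mod_eq_emod_of_pos hw,
    PySem.Int.floordiv_eq_ediv_of_pos hw,
    PySem.Int.mod_eq_emod_of_pos (show (0:Int) < 2 by norm_num)]
  split_ifs <;> rfl

lemma rawIdx_spec {w i : Int} (hw : 0 < w) :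
    (0 ≤ rawIdx w i ∧ rawIdx w i = posP w i) ∨
    (rawIdx w i < 0 ∧ w + rawIdx w i = posP w i) := by
  have hw2 : (0:Int) < 2*w := by omega
  have hq := Int.ediv_add_emod i w
  have hs0 := Int.emod_nonneg i (show w ≠ 0 by omega)
  have hs1 := Int.emod_lt_of_pos i hw
  by_cases h1 : i % w = 0
  · by_cases h2 : (i / w) % 2 ≠ 0
    · have hk : i / w = 2 * (i / w / 2) + 1 := by omega
      have hmod : (i - 1) % (2*w) = w - 1 := emod_eq_of_dvd_sub hw2 (by omega) (by omega)
        ⟨i / w / 2, by linear_combination -hq + w * hk + h1⟩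
      have hpos : posP w i = w - 1 := by unfold posP; rw [hmod]; split_ifs <;> omega
      have hraw : rawIdx w i = w - 1 := by unfold rawIdx; simp [h1, h2]
      left; omega
    · have hk : i / w = 2 * (i / w / 2) := by omega
      have hmod : (i - 1) % (2*w) = 2*w - 1 := emod_eq_of_dvd_sub hw2 (by omega) (by omega)
        ⟨i / w / 2 - 1, by linear_combination -hq + w * hk + h1⟩
      have hpos : posP w i = 0 := by unfold posP; rw [hmod]; split_ifs <;> omega
      have hraw : rawIdx w i = 0 := by unfold rawIdx; simp [h1, h2]
      left; omega
  · by_cases h2 : (i / w) % 2 ≠ 0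
    · have hk : i / w = 2 * (i / w / 2) + 1 := by omega
      have hmod : (i - 1) % (2*w) = w + (i % w) - 1 := emod_eq_of_dvd_sub hw2 (by omega) (by omega)
        ⟨i / w / 2, by linear_combination -hq + w * hk⟩
      have hpos : posP w i = w - i % w := by unfold posP; rw [hmod]; split_ifs <;> omega
      have hraw : rawIdx w i = -(i % w) := by unfold rawIdx; simp [h1, h2]
      right; omega
    · have hk : i / w = 2 * (i / w / 2) := by omega
      have hmod : (i - 1) % (2*w) = (i % w) - 1 := emod_eq_of_dvd_sub hw2 (by omega) (by omega)
        ⟨i / w / 2, by linear_combination -hq + w * hk⟩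
      have hpos : posP w i = i % w - 1 := by unfold posP; rw [hmod]; split_ifs <;> omega
      have hraw : rawIdx w i = i % w - 1 := by unfold rawIdx; simp [h1, h2]
      left; omega

lemma pyGetD_raw {w : Int} (hw : 0 < w) {bl : List Int} (hl : bl.length = w.toNat) (i : Int) :
    PySem.List.pyGetD bl (rawIdx w i) 0 = bl.getD (posP w i).toNat 0 := by
  have hb := posP_bounds hw i
  rcases rawIdx_spec (i := i) hw with ⟨h0, he⟩ | ⟨h0, he⟩
  · rw [show rawIdx w i = (((rawIdx w i).toNat : Nat) : Int) by omega,
      PySem.List.pyGetD_natCast]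
    rw [show (rawIdx w i).toNat = (posP w i).toNat by omega]
  · rw [show rawIdx w i = -(((-(rawIdx w i)).toNat : Nat) : Int) by omega,
      PySem.List.pyGetD_neg_natCast bl ((-(rawIdx w i)).toNat) 0 (by omega) (by omega),
      List.getD_eq_getElem bl 0 (show (posP w i).toNat < bl.length by omega)]
    have hn : bl.length - (-(rawIdx w i)).toNat = (posP w i).toNat := by omega
    simp only [hn]

lemma pySetD_raw {w : Int} (hw : 0 < w) {bl : List Int} (hl : bl.length = w.toNat) (i v : Int) :
    PySem.List.pySetD bl (rawIdx w i) v = bl.set (posP w i).toNat v := by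
  have hb := posP_bounds hw i
  rcases rawIdx_spec (i := i) hw with ⟨h0, he⟩ | ⟨h0, he⟩
  · rw [PySem.List.pySetD_of_nonneg bl v h0]
    congr 1
    omega
  · simp only [PySem.List.pySetD, PySem.List.pySet?, PySem.List.pyIdx?,
      if_neg (show ¬ (0 ≤ rawIdx w i) by omega), if_pos (show -((bl.length : Int)) ≤ rawIdx w i by rw [hl]; omega),
      Option.map_some, Option.getD_some]
    congr 1
    omega

lemma getD_set_lt {bl : List Int} {n : Nat} (hn : n < bl.length) (v : Int) (t : Nat) :
    (bl.set n v).getD t 0 = if n = t then v else bl.getD t 0 := by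
  simp only [List.getD, List.getElem?_set, if_pos hn]
  split_ifs <;> rfl

lemma fold_count {w : Int} (hw : 0 < w) (t : Nat) (ht : t < w.toNat) :
    ∀ (L : List Int) (bl : List Int), bl.length = w.toNat →
      (L.foldl (stepA w) bl).getD t 0 = bl.getD t 0 + (L.countP (fun i => (posP w i).toNat == t) : Int) := by
  intro L
  induction L with
  | nil => intro bl _; simp
  | cons i L ih =>
    intro bl hbl
    have hb := posP_bounds hw i
    have hlt : (posP w i).toNat < bl.length := by rw [hbl]; omega
    rw [List.foldl_cons, stepA_raw hw, pySetD_raw hw hbl, pyGetD_raw hw hbl,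
      ih _ (by rw [List.length_set, hbl]), List.countP_cons,
      getD_set_lt hlt]
    by_cases hc : (posP w i).toNat = t
    · simp only [hc, beq_self_eq_true, if_true]
      push_cast
      ring
    · simp only [beq_iff_eq, if_neg hc, Nat.add_zero]

lemma fold_length {w : Int} (hw : 0 < w) :
    ∀ (L : List Int) (bl : List Int), bl.length = w.toNat →
      (L.foldl (stepA w) bl).length = w.toNat := by
  intro L
  induction L with
  | nil => intro bl hbl; simpa using hbl
  | cons i L ih =>
    intro bl hbl
    rw [List.foldl_cons, stepA_raw hw, pySetD_raw hw hbl]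
    exact ih _ (by rw [List.length_set, hbl])

lemma ediv_sub_one {m : Int} (hm : 0 < m) (x : Int) :
    x / m - (x - 1) / m = if x % m = 0 then 1 else 0 := by
  have hq := Int.ediv_add_emod x m
  have hr0 := Int.emod_nonneg x (show m ≠ 0 by omega)
  have hr1 := Int.emod_lt_of_pos x hm
  have hx : x - 1 = (x % m - 1) + (x / m) * m := by linear_combination -hq
  have h2 : (x - 1) / m = (x % m - 1) / m + x / m := by
    rw [hx, Int.add_mul_ediv_right _ _ (show m ≠ 0 by omega)]
  by_cases hc : x % m = 0
  · have hneg : (-1 : Int) / m = -1 := by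
      have h3 := Int.add_mul_ediv_right (m-1) (-1) (show m ≠ 0 by omega)
      rw [show (m-1) + (-1)*m = -1 by ring] at h3
      rw [h3, Int.ediv_eq_zero_of_lt (show (0:Int) ≤ m - 1 by omega) (show m - 1 < m by omega)]
      omega
    have h4 : (x % m - 1) / m = -1 := by rw [hc]; simpa using hneg
    rw [if_pos hc, h2, h4]
    ring
  · have h4 : (x % m - 1) / m = 0 :=
      Int.ediv_eq_zero_of_lt (show (0:Int) ≤ x % m - 1 by omega) (show x % m - 1 < m by omega)
    rw [if_neg hc, h2, h4]
    ring

lemma count_range {m a : Int} (hm : 0 < m) (ha : 0 ≤ a) (ha2 : a < m) :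
    ∀ (n : Nat) (num e : Int), e + 1 - num = (n : Int) →
      ((PySem.List.pyRange num (e + 1) 1).countP (fun i => i % m == a) : Int)
        = (e - a) / m - (num - 1 - a) / m := by
  intro n
  induction n with
  | zero =>
    intro num e hn
    rw [PySem.List.pyRange_one_eq_nil (by omega), List.countP_nil,
      show num - 1 - a = e - a by omega]
    omega
  | succ k ih =>
    intro num e hn
    rw [PySem.List.pyRange_one_cons (by omega), List.countP_cons]
    have hih := ih (num + 1) e (by omega)
    rw [show num + 1 - 1 - a = num - a by ring] at hih
    have hstep := ediv_sub_one hm (num - a)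
    rw [show num - a - 1 = num - 1 - a by ring] at hstep
    have hiff : num % m = a ↔ (num - a) % m = 0 := by
      rw [← Int.emod_eq_of_lt ha ha2, Int.emod_eq_emod_iff_emod_sub_eq_zero]
      rw [Int.emod_eq_of_lt ha ha2]
    by_cases hc : num % m = a
    · have hcond : (num % m == a) = true := by simp [hc]
      rw [if_pos (hiff.mp hc)] at hstep
      rw [hcond, if_pos rfl]
      push_cast
      omega
    · have hcond : (num % m == a) = false := by simp [hc]
      rw [if_neg (fun h => hc (hiff.mpr h))] at hstep
      rw [hcond]
      push_cast
      omega

lemma countP_or_disjoint {α : Type} (p q : α → Bool) :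
    ∀ (l : List α), (∀ x ∈ l, ¬(p x = true ∧ q x = true)) →
      l.countP (fun x => p x || q x) = l.countP p + l.countP q := by
  intro l
  induction l with
  | nil => intro _; simp
  | cons x l ih =>
    intro h
    have hx := h x (List.mem_cons_self)
    rw [List.countP_cons, List.countP_cons, List.countP_cons,
      ih (fun y hy => h y (List.mem_cons_of_mem x hy))]
    cases hp : p x <;> cases hq : q x <;> simp [hp, hq] at hx ⊢ <;> omega

lemma posP_eq_iff {w i p : Int} (hw : 0 < w) (hp : 0 ≤ p) (hp2 : p < w) :
    posP w i = p ↔ i % (2 * w) = (p + 1) % (2 * w) ∨ i % (2 * w) = (2 * w - p) % (2 * w) := by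
  have hw2 : (0:Int) < 2*w := by omega
  have hr0 := Int.emod_nonneg (i - 1) (show (2*w) ≠ 0 by omega)
  have hr1 := Int.emod_lt_of_pos (i - 1) hw2
  have e1 : p % (2*w) = p := Int.emod_eq_of_lt hp (by omega)
  have e2 : (2*w - 1 - p) % (2*w) = 2*w - 1 - p :=
    Int.emod_eq_of_lt (by omega) (by omega)
  have hA : ((i - 1) % (2*w) = p) ↔ (2*w) ∣ (i - 1 - p) := by
    constructor
    · intro h
      rw [Int.dvd_iff_emod_eq_zero, ← Int.emod_eq_emod_iff_emod_sub_eq_zero, h, e1]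
    · intro h
      exact emod_eq_of_dvd_sub hw2 hp (by omega) h
  have hB : ((i - 1) % (2*w) = 2*w - 1 - p) ↔ (2*w) ∣ (i - 1 - (2*w - 1 - p)) := by
    constructor
    · intro h
      rw [Int.dvd_iff_emod_eq_zero, ← Int.emod_eq_emod_iff_emod_sub_eq_zero, h, e2]
    · intro h
      exact emod_eq_of_dvd_sub hw2 (by omega) (by omega) h
  have hA' : (i % (2*w) = (p + 1) % (2*w)) ↔ (2*w) ∣ (i - (p + 1)) := by
    rw [Int.emod_eq_emod_iff_emod_sub_eq_zero, ← Int.dvd_iff_emod_eq_zero]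
  have hB' : (i % (2*w) = (2*w - p) % (2*w)) ↔ (2*w) ∣ (i - (2*w - p)) := by
    rw [Int.emod_eq_emod_iff_emod_sub_eq_zero, ← Int.dvd_iff_emod_eq_zero]
  rw [hA', hB', show i - (p + 1) = i - 1 - p by ring,
    show i - (2*w - p) = i - 1 - (2*w - 1 - p) by ring, ← hA, ← hB]
  unfold posP
  split_ifs with h <;> omega

-- ===== VERDICT (by name: the statement is the Claim_ definition above) =====
theorem solution_spec : Claim_equal_solution := by
  intro e w num _ hpre
  have hw : 0 < w := hpre
  have hw2 : (0:Int) < 2*w := by omega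
  have hbnum := posP_bounds hw num
  unfold Spec_solution
  -- A's box_idx expression is rawIdx in emod/ediv form
  have hbi : (if PySem.Int.mod num w = 0 then
        if PySem.Int.mod (PySem.Int.floordiv num w) 2 ≠ 0 then w - 1 else 0
      else if PySem.Int.mod (PySem.Int.floordiv num w) 2 ≠ 0 then -(PySem.Int.mod num w)
      else PySem.Int.mod num w - 1) = rawIdx w num := by
    simp only [rawIdx, PySem.Int.mod_eq_emod_of_pos hw, PySem.Int.floordiv_eq_ediv_of_pos hw,
      PySem.Int.mod_eq_emod_of_pos (show (0:Int) < 2 by norm_num)]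
  have hlen0 : ((PySem.List.pyRange 0 w 1).map (fun _ => (0:Int))).length = w.toNat := by
    simp [PySem.List.length_pyRange_one]
  have hgetD0 : ∀ t : Nat, ((PySem.List.pyRange 0 w 1).map (fun _ => (0:Int))).getD t 0 = 0 := by
    intro t
    rw [List.map_const']
    rcases Nat.lt_or_ge t ((PySem.List.pyRange 0 w 1).length) with h | h
    · exact List.getD_replicate 0 h
    · rw [List.getD_eq_getElem?_getD, List.getElem?_replicate, if_neg (by omega)]
      rfl
  -- A's result is a count of boxes landing at num's canonical rack position
  have hL : solution e w num
      = ((PySem.List.pyRange num (e+1) 1).countP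
          (fun i => (posP w i).toNat == (posP w num).toNat) : Int) := by
    simp only [solution]
    rw [hbi]
    have hflen := fold_length hw (PySem.List.pyRange num (e+1) 1) _ hlen0
    rw [pyGetD_raw hw hflen num,
      fold_count hw (posP w num).toNat (by omega) _ _ hlen0, hgetD0]
    omega
  by_cases hend : e < num
  · rw [hL, PySem.List.pyRange_one_eq_nil (show e + 1 ≤ num by omega), List.countP_nil]
    simp only [solution_alt, if_pos hend]
    rfl
  · -- both residues mod 2w that land at position p := posP w num
    have ha1n := Int.emod_nonneg (posP w num + 1) (show 2*w ≠ 0 by omega)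
    have ha1l := Int.emod_lt_of_pos (posP w num + 1) hw2
    have ha2n := Int.emod_nonneg (2*w - posP w num) (show 2*w ≠ 0 by omega)
    have ha2l := Int.emod_lt_of_pos (2*w - posP w num) hw2
    have ha1 : (posP w num + 1) % (2*w) = posP w num + 1 :=
      Int.emod_eq_of_lt (by omega) (by omega)
    have hne : (posP w num + 1) % (2*w) ≠ (2*w - posP w num) % (2*w) := by
      by_cases hp0 : posP w num = 0
      · rw [ha1, show 2*w - posP w num = 2*w by omega, Int.emod_self]
        omega
      · rw [ha1, Int.emod_eq_of_lt (by omega) (by omega)]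
        omega
    have hc1 : (PySem.List.pyRange num (e+1) 1).countP
          (fun i => (posP w i).toNat == (posP w num).toNat)
        = (PySem.List.pyRange num (e+1) 1).countP
          (fun i => (i % (2*w) == (posP w num + 1) % (2*w)) || (i % (2*w) == (2*w - posP w num) % (2*w))) := by
      apply List.countP_congr
      intro x _
      have hbx := posP_bounds hw x
      simp only [beq_iff_eq, Bool.or_eq_true]
      constructor
      · intro h
        exact (posP_eq_iff hw hbnum.1 hbnum.2).mp (by omega)
      · intro h
        have := (posP_eq_iff hw hbnum.1 hbnum.2).mpr h
        omega
    have hc2 := countP_or_disjoint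
      (fun i => i % (2*w) == (posP w num + 1) % (2*w))
      (fun i => i % (2*w) == (2*w - posP w num) % (2*w))
      (PySem.List.pyRange num (e+1) 1)
      (by
        intro x _ ⟨h1, h2⟩
        simp only [beq_iff_eq] at h1 h2
        exact hne (h1 ▸ h2 ▸ rfl))
    have hr1 := count_range hw2 ha1n ha1l (e + 1 - num).toNat num e (by omega)
    have hr2 := count_range hw2 ha2n ha2l (e + 1 - num).toNat num e (by omega)
    have hB : solution_alt e w num
        = ((e - (posP w num + 1) % (2*w)) / (2*w) - (num - 1 - (posP w num + 1) % (2*w)) / (2*w))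
          + ((e - (2*w - posP w num) % (2*w)) / (2*w) - (num - 1 - (2*w - posP w num) % (2*w)) / (2*w)) := by
      simp only [solution_alt, if_neg hend, PySem.Int.mod_eq_emod_of_pos hw2,
        PySem.Int.floordiv_eq_ediv_of_pos hw2, posP]
    rw [hL, hc1, hc2, hB]
    push_cast
    omega
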